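-- pv_equiv track=rewrite | github.com/ZiqiBen/College_Application_Agent | src/rag_service/multi_agent_generator.py | _generate_interests
-- ===== SOURCE A (Python) =====
-- from typing import Dict, List, Optional, Tuple
--
-- def _generate_interests(profile: Dict) -> str:
--     """Generate interests section for the personal statement based on skills and experiences."""
--     skills = profile.get("skills", [])
--     interests = []
--
--     if any("machine learning" in skill.lower() for skill in skills):
--         interests.append("applied machine learning")
--     if any("statistics" in skill.lower() or "statistical" in skill.lower() for skill in skills):
--         interests.append("statistical modeling")
--     if any("visualization" in skill.lower() for skill in skills):
--         interests.append("data visualization")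
--     if any("nlp" in skill.lower() or "natural language" in skill.lower() for skill in skills):
--         interests.append("natural language processing")
--
--     if not interests:
--         interests = ["applied machine learning", "statistical analysis", "data-driven decision making"]
--
--     return ", ".join(interests[:3])
-- ===== SOURCE B (Python) =====
-- def _generate_interests(profile):
--     """Generate interests section for the personal statement based on skills and experiences."""
--     ml = st = vz = nl = False
--     for skill in profile.get("skills", []):
--         s = skill.lower()
--         ml = ml or "machine learning" in s
--         st = st or "statistics" in s or "statistical" in s
--         vz = vz or "visualization" in s
--         nl = nl or "nlp" in s or "natural language" in s
--     interests = [label for hit, label in (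
--         (ml, "applied machine learning"),
--         (st, "statistical modeling"),
--         (vz, "data visualization"),
--         (nl, "natural language processing")) if hit]
--     if not interests:
--         interests = ["applied machine learning", "statistical analysis", "data-driven decision making"]
--     return ", ".join(interests[:3])
-- ===== Notes on version B (the rewrite author's own statement) =====
-- stated objective: alternative
-- what changed: Replaced A's four independent any-scans over the skills list by a single pass that folds one (ml,st,vz,nl) boolean accumulator over the skills (lowercasing each skill once), then decodes the accumulator into labels.
import Mathlib
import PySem

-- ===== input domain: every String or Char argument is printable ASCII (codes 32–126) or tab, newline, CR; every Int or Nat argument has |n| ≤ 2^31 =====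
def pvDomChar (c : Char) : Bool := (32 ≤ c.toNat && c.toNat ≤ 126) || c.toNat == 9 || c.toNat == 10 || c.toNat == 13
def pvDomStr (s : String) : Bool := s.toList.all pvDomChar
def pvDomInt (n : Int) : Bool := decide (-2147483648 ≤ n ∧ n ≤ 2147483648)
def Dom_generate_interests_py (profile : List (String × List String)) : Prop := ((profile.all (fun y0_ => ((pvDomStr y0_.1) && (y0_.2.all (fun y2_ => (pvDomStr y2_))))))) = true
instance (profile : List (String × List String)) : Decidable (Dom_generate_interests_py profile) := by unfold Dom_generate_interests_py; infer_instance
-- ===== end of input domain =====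

-- B makes one pass over the skills folding a four-boolean accumulator (lowercasing each skill once),
-- then decodes the accumulator into labels, instead of A's four independent any-scans (alternative).

-- ===== PORT A =====
def generate_interests_py (profile : List (String × List String)) : String :=
  let skills := PySem.Dict.getD ⟨profile⟩ "skills" []
  let interests : List String := []
  let interests := if skills.any (fun skill => PySem.Str.isIn "machine learning" (PySem.Str.lower skill))
    then interests ++ ["applied machine learning"] else interests
  let interests := if skills.any (fun skill => PySem.Str.isIn "statistics" (PySem.Str.lower skill) || PySem.Str.isIn "statistical" (PySem.Str.lower skill))
    then interests ++ ["statistical modeling"] else interests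
  let interests := if skills.any (fun skill => PySem.Str.isIn "visualization" (PySem.Str.lower skill))
    then interests ++ ["data visualization"] else interests
  let interests := if skills.any (fun skill => PySem.Str.isIn "nlp" (PySem.Str.lower skill) || PySem.Str.isIn "natural language" (PySem.Str.lower skill))
    then interests ++ ["natural language processing"] else interests
  let interests := if interests.isEmpty
    then ["applied machine learning", "statistical analysis", "data-driven decision making"] else interests
  PySem.Str.join ", " (PySem.List.slice interests none (some 3))

-- ===== PORT B =====
-- one loop iteration of Source B: update the (ml, st, vz, nl) accumulator with one skill
def pvStep (st : Bool × Bool × Bool × Bool) (skill : String) : Bool × Bool × Bool × Bool :=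
  let s := PySem.Str.lower skill
  ( st.1 || PySem.Str.isIn "machine learning" s,
    st.2.1 || PySem.Str.isIn "statistics" s || PySem.Str.isIn "statistical" s,
    st.2.2.1 || PySem.Str.isIn "visualization" s,
    st.2.2.2 || PySem.Str.isIn "nlp" s || PySem.Str.isIn "natural language" s )

def generate_interests_py_alt (profile : List (String × List String)) : String :=
  let skills := PySem.Dict.getD ⟨profile⟩ "skills" []
  let r := skills.foldl pvStep (false, false, false, false)
  let interests := (([ (r.1, "applied machine learning"),
                       (r.2.1, "statistical modeling"),
                       (r.2.2.1, "data visualization"),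
                       (r.2.2.2, "natural language processing") ].filter (fun p => p.1)).map (fun p => p.2))
  let interests := if interests.isEmpty
    then ["applied machine learning", "statistical analysis", "data-driven decision making"] else interests
  PySem.Str.join ", " (interests.take 3)

-- ===== PRECONDITION & SPEC =====
def Spec_generate_interests_py (profile : List (String × List String)) (out : String) : Prop := out = generate_interests_py_alt profile
instance (profile : List (String × List String)) (out : String) : Decidable (Spec_generate_interests_py profile out) := by unfold Spec_generate_interests_py; infer_instance

-- ===== CLAIM (what is proved, stated in full; the proofs are below) =====
def Claim_equal_generate_interests_py : Prop := ∀ (profile : List (String × List String)), Dom_generate_interests_py profile → Spec_generate_interests_py profile (generate_interests_py profile)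

-- ===== LEMMAS AND PROOFS =====

-- the fold of pvStep computes exactly the four 'any' scans, OR-ed onto the initial accumulator
theorem pvStep_foldl (skills : List String) (a b c d : Bool) :
    skills.foldl pvStep (a, b, c, d) =
      ( a || skills.any (fun skill => PySem.Str.isIn "machine learning" (PySem.Str.lower skill)),
        b || skills.any (fun skill => PySem.Str.isIn "statistics" (PySem.Str.lower skill) || PySem.Str.isIn "statistical" (PySem.Str.lower skill)),
        c || skills.any (fun skill => PySem.Str.isIn "visualization" (PySem.Str.lower skill)),
        d || skills.any (fun skill => PySem.Str.isIn "nlp" (PySem.Str.lower skill) || PySem.Str.isIn "natural language" (PySem.Str.lower skill)) ) := by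
  induction skills generalizing a b c d with
  | nil => simp
  | cons s t ih =>
    simp only [List.foldl_cons, pvStep, List.any_cons, ih, Bool.or_assoc]

-- ===== VERDICT (by name: the statement is the Claim_ definition above) =====
theorem generate_interests_py_spec : Claim_equal_generate_interests_py := by
  intro profile _
  unfold Spec_generate_interests_py generate_interests_py generate_interests_py_alt
  simp only [pvStep_foldl, Bool.false_or]
  cases h1 : (PySem.Dict.getD ⟨profile⟩ "skills" []).any (fun skill => PySem.Str.isIn "machine learning" (PySem.Str.lower skill)) <;>
  cases h2 : (PySem.Dict.getD ⟨profile⟩ "skills" []).any (fun skill => PySem.Str.isIn "statistics" (PySem.Str.lower skill) || PySem.Str.isIn "statistical" (PySem.Str.lower skill)) <;>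
  cases h3 : (PySem.Dict.getD ⟨profile⟩ "skills" []).any (fun skill => PySem.Str.isIn "visualization" (PySem.Str.lower skill)) <;>
  cases h4 : (PySem.Dict.getD ⟨profile⟩ "skills" []).any (fun skill => PySem.Str.isIn "nlp" (PySem.Str.lower skill) || PySem.Str.isIn "natural language" (PySem.Str.lower skill)) <;>
  decide
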